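-- pv_equiv track=rewrite | github.com/AmiQT/prototype | backend/app/ai_assistant/admin_db_assistant.py | _parse_admin_intent
-- ===== SOURCE A (Python) =====
-- from typing import Any, Dict, List
--
-- def _parse_admin_intent(command: str) -> Dict[str, Any] | None:
--     """Parse admin command to database intent"""
--     command_lower = command.lower()
--
--     # Student queries
--     if any(word in command_lower for word in ["students", "pelajar", "student"]):
--         if any(word in command_lower for word in ["list", "show", "tunjuk"]):
--             return {"type": "list_students"}
--         elif any(word in command_lower for word in ["incomplete", "tak lengkap"]):
--             return {"type": "incomplete_profiles"}
--
--     # Event queries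
--     elif any(word in command_lower for word in ["events", "acara", "event"]):
--         if any(word in command_lower for word in ["list", "show", "tunjuk"]):
--             return {"type": "list_events"}
--
--     # Analytics queries
--     elif any(word in command_lower for word in ["analytics", "stats", "department"]):
--         return {"type": "department_stats"}
--
--     return None
-- ===== SOURCE B (Python) =====
-- FEATURES = {
--     "stu": ["students", "pelajar", "student"],
--     "evt": ["events", "acara", "event"],
--     "ana": ["analytics", "stats", "department"],
--     "lst": ["list", "show", "tunjuk"],
--     "inc": ["incomplete", "tak lengkap"],
-- }
--
-- CATEGORIES = ["stu", "evt", "ana"]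
--
-- INTENTS = [
--     ("list_students", "stu", ["lst"]),
--     ("incomplete_profiles", "stu", ["inc"]),
--     ("list_events", "evt", ["lst"]),
--     ("department_stats", "ana", []),
-- ]
--
--
-- def _parse_admin_intent(command):
--     """Staged classifier: extract ALL keyword features in one pass, resolve the
--     category by priority, then look up the first intent whose category and
--     extra features are satisfied."""
--     cl = command.lower()
--     flags = {tag for tag, words in FEATURES.items() if any(w in cl for w in words)}
--     cat = next((c for c in CATEGORIES if c in flags), None)
--     for name, c, extras in INTENTS:
--         if c == cat and all(e in flags for e in extras):
--             return {"type": name}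
--     return None
-- ===== Notes on version B (the rewrite author's own statement) =====
-- stated objective: alternative
-- what changed: Replaces A's short-circuiting nested if/elif cascade by a staged pipeline: one eager pass extracts a feature set of ALL keyword-group hits, a priority list resolves the committed category, and a declarative intent table is scanned for the first entry whose category and extra features are satisfied.
import Mathlib
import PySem

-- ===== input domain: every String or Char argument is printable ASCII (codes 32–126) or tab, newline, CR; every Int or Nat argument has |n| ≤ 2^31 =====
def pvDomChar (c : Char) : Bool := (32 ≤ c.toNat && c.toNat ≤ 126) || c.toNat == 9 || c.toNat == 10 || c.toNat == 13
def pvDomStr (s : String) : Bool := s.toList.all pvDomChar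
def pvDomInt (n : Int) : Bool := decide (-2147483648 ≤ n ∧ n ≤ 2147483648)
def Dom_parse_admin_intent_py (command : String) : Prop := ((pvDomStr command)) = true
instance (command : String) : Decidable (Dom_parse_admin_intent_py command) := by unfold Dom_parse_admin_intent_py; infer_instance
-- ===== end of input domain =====

-- B replaces the lazy if/elif cascade by a staged pipeline: eager feature-set extraction, priority category resolution, then a first-match intent table (objective: alternative, same cost).

-- ===== PORT A =====
def parse_admin_intent_py (command : String) : Option (List (String × String)) :=
  let cl := PySem.Str.lower command
  if ["students","pelajar","student"].any (fun w => PySem.Str.isIn w cl) then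
    if ["list","show","tunjuk"].any (fun w => PySem.Str.isIn w cl) then
      some [("type","list_students")]
    else if ["incomplete","tak lengkap"].any (fun w => PySem.Str.isIn w cl) then
      some [("type","incomplete_profiles")]
    else none
  else if ["events","acara","event"].any (fun w => PySem.Str.isIn w cl) then
    if ["list","show","tunjuk"].any (fun w => PySem.Str.isIn w cl) then
      some [("type","list_events")]
    else none
  else if ["analytics","stats","department"].any (fun w => PySem.Str.isIn w cl) then
    some [("type","department_stats")]
  else none

-- ===== PORT B =====
-- B-side tables: feature dict (tag -> keyword group), category priority list, intent table
def pvFeatures : List (String × List String) :=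
  [ ("stu", ["students","pelajar","student"]),
    ("evt", ["events","acara","event"]),
    ("ana", ["analytics","stats","department"]),
    ("lst", ["list","show","tunjuk"]),
    ("inc", ["incomplete","tak lengkap"]) ]

def pvCategories : List String := ["stu", "evt", "ana"]

def pvIntents : List (String × String × List String) :=
  [ ("list_students", "stu", ["lst"]),
    ("incomplete_profiles", "stu", ["inc"]),
    ("list_events", "evt", ["lst"]),
    ("department_stats", "ana", []) ]

def parse_admin_intent_py_alt (command : String) : Option (List (String × String)) :=
  let cl := PySem.Str.lower command
  -- flags = {tag for tag, words in FEATURES.items() if any(w in cl for w in words)}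
  let flags : PySem.Set String :=
    PySem.Set.ofList ((pvFeatures.filter (fun p => p.2.any (fun w => PySem.Str.isIn w cl))).map Prod.fst)
  -- cat = next((c for c in CATEGORIES if c in flags), None)
  let cat : Option String := pvCategories.find? (fun c => PySem.Set.contains flags c)
  -- first intent whose category equals cat and whose extras are all present
  (pvIntents.find? (fun t => (some t.2.1 == cat) && t.2.2.all (fun e => PySem.Set.contains flags e))).map
    (fun t => [("type", t.1)])

-- ===== PRECONDITION & SPEC =====
def Spec_parse_admin_intent_py (command : String) (out : Option (List (String × String))) : Prop := out = parse_admin_intent_py_alt command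
instance (command : String) (out : Option (List (String × String))) : Decidable (Spec_parse_admin_intent_py command out) := by unfold Spec_parse_admin_intent_py; infer_instance

-- ===== CLAIM =====
def Claim_equal_parse_admin_intent_py : Prop := ∀ (command : String), Dom_parse_admin_intent_py command → Spec_parse_admin_intent_py command (parse_admin_intent_py command)

-- ===== LEMMAS AND PROOFS =====

-- ===== VERDICT =====
theorem parse_admin_intent_py_spec : Claim_equal_parse_admin_intent_py := by
  intro command _
  unfold Spec_parse_admin_intent_py parse_admin_intent_py parse_admin_intent_py_alt
  simp only [pvFeatures, pvCategories, pvIntents, List.filter_cons, List.filter_nil]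
  generalize PySem.Str.lower command = cl
  generalize ["students","pelajar","student"].any (fun w => PySem.Str.isIn w cl) = b1
  generalize ["events","acara","event"].any (fun w => PySem.Str.isIn w cl) = b2
  generalize ["analytics","stats","department"].any (fun w => PySem.Str.isIn w cl) = b3
  generalize ["list","show","tunjuk"].any (fun w => PySem.Str.isIn w cl) = b4
  generalize ["incomplete","tak lengkap"].any (fun w => PySem.Str.isIn w cl) = b5
  cases b1 <;> cases b2 <;> cases b3 <;> cases b4 <;> cases b5 <;> rfl
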